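-- pv_equiv track=rewrite | github.com/wahello/jvb | quicklook/calculation_helper.py | cal_average_sleep_grade
-- ===== SOURCE A (Python) =====
-- def cal_average_sleep_grade(sleep_duration,sleep_aid_taken=None):
-- 	def _to_sec(duration):
-- 		hours,mins = map(int,[0 if x == '' else x
-- 					for x in duration.split(':')])
-- 		return hours * 3600 + mins * 60
--
-- 	_tobj = {
-- 		"6:00":_to_sec("6:00"),
-- 		"6:29":_to_sec("6:29"),
-- 		"6:30":_to_sec("6:30"),
-- 		"7:00":_to_sec("7:00"),
-- 		"7:29":_to_sec("7:29"),
-- 		"7:30":_to_sec("7:30"),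
-- 		"10:00":_to_sec("10:00"),
-- 		"10:01":_to_sec("10:01"),
-- 		"10:30":_to_sec("10:30"),
-- 		"10:31":_to_sec("10:31"),
-- 		"11:00":_to_sec("11:00"),
-- 		"11:30":_to_sec("11:30"),
-- 		"12:00":_to_sec("12:00"),
-- 	}
--
-- 	GRADES = {0:"F",1:"D",2:"C",3:"B",4:"A"}
--
-- 	sleep_duration = _to_sec(sleep_duration)
-- 	points = 0
--
-- 	if sleep_duration < _tobj["6:00"] or sleep_duration > _tobj["12:00"]:
-- 		points = 0
--
-- 	elif sleep_duration >= _tobj["7:30"] and sleep_duration <= _tobj["10:00"]: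
-- 	   points = 4
--
-- 	elif ((sleep_duration >= _tobj["7:00"] and sleep_duration <= _tobj["7:29"]) or \
-- 		(sleep_duration >= _tobj["10:01"] and sleep_duration <= _tobj["10:30"])) :
-- 		points = 3
--
-- 	elif ((sleep_duration >= _tobj["6:30"] and sleep_duration <= _tobj["7:29"]) or \
-- 		(sleep_duration >= _tobj["10:31"] and sleep_duration <= _tobj["11:00"])) :
-- 	   	points = 2
--
-- 	elif ((sleep_duration >= _tobj["6:00"] and sleep_duration <= _tobj["6:29"]) or \
-- 		(sleep_duration >= _tobj["11:30"] and sleep_duration <= _tobj["12:00"])) :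
-- 	   	points = 1
--
-- 	if sleep_aid_taken == "yes":
-- 		if points >= 2:
-- 			points -= 2
-- 		else:
-- 			points = 0
--
-- 	return (GRADES[points],points)
-- ===== SOURCE B (Python) =====
-- _BANDS = [
--     (21600, 23340, 1),
--     (23400, 25199, 2),
--     (25200, 26940, 3),
--     (27000, 36000, 4),
--     (36060, 37800, 3),
--     (37860, 39600, 2),
--     (41400, 43200, 1),
-- ]
--
--
-- def cal_average_sleep_grade(sleep_duration, sleep_aid_taken=None):
--     h, m = sleep_duration.split(':')
--     sec = int(h or '0') * 3600 + int(m or '0') * 60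
--     points = 0
--     for lo, hi, p in _BANDS:
--         if lo <= sec <= hi:
--             points = p
--             break
--     if sleep_aid_taken == "yes":
--         points = max(points - 2, 0)
--     return ("FDCBA"[points], points)
-- ===== Notes on version B (the rewrite author's own statement) =====
-- stated objective: simpler
-- what changed: Replaces the five-branch elif cascade over a dict of parsed time constants by a first-match scan over a table of seven non-overlapping second bands (precomputed to honour the cascade's overlap precedence), inlines the parse, and maps points to a grade by indexing a five-letter grade string instead of a dict.
import Mathlib
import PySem

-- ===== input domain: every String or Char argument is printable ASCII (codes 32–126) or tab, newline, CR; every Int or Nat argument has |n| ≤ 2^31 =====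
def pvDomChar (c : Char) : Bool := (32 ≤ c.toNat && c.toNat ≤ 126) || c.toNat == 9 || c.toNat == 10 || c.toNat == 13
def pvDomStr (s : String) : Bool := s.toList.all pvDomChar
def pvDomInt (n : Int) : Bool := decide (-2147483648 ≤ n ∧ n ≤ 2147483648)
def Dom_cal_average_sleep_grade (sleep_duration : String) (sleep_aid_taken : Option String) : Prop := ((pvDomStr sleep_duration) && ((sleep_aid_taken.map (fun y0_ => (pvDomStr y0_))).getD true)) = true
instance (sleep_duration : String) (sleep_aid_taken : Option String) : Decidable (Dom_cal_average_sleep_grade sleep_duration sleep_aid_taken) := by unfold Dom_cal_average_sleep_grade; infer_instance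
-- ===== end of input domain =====

-- B replaces A's five-branch elif cascade (overlapping ranges, dict of parsed time constants)
-- by a first-match scan over a table of seven non-overlapping second bands; objective: simpler.

-- ===== PORT A =====
-- the inner duration-to-seconds helper: split on the colon, empty part counts as 0,
-- hours*3600 + mins*60; none = ValueError / unpacking error
def pvToSecA (duration : String) : Option Int :=
  match (PySem.Str.split? duration ":").getD [] with
  | [h, m] =>
    match (if h = "" then some (0 : Int) else PySem.Int.ofStr? h),
          (if m = "" then some (0 : Int) else PySem.Int.ofStr? m) with
    | some hv, some mv => some (hv * 3600 + mv * 60)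
    | _, _ => none
  | _ => none

-- the dict of duration constants in seconds (every pvToSecA here is some; getD 0 never fires)
def pvTobj : PySem.Dict String Int :=
  PySem.Dict.ofList
    [("6:00", (pvToSecA "6:00").getD 0), ("6:29", (pvToSecA "6:29").getD 0),
     ("6:30", (pvToSecA "6:30").getD 0), ("7:00", (pvToSecA "7:00").getD 0),
     ("7:29", (pvToSecA "7:29").getD 0), ("7:30", (pvToSecA "7:30").getD 0),
     ("10:00", (pvToSecA "10:00").getD 0), ("10:01", (pvToSecA "10:01").getD 0),
     ("10:30", (pvToSecA "10:30").getD 0), ("10:31", (pvToSecA "10:31").getD 0),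
     ("11:00", (pvToSecA "11:00").getD 0), ("11:30", (pvToSecA "11:30").getD 0),
     ("12:00", (pvToSecA "12:00").getD 0)]

def pvGrades : PySem.Dict Int String :=
  PySem.Dict.ofList [(0, "F"), (1, "D"), (2, "C"), (3, "B"), (4, "A")]

-- the body of A after the seconds conversion of sleep_duration succeeded
def pvRunA (sec : Int) (sleep_aid_taken : Option String) : String × Int :=
  let g : String → Int := fun k => PySem.Dict.getD pvTobj k 0
  let points : Int :=
    if sec < g "6:00" ∨ sec > g "12:00" then 0
    else if sec ≥ g "7:30" ∧ sec ≤ g "10:00" then 4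
    else if (sec ≥ g "7:00" ∧ sec ≤ g "7:29") ∨ (sec ≥ g "10:01" ∧ sec ≤ g "10:30") then 3
    else if (sec ≥ g "6:30" ∧ sec ≤ g "7:29") ∨ (sec ≥ g "10:31" ∧ sec ≤ g "11:00") then 2
    else if (sec ≥ g "6:00" ∧ sec ≤ g "6:29") ∨ (sec ≥ g "11:30" ∧ sec ≤ g "12:00") then 1
    else 0
  let points : Int :=
    if sleep_aid_taken = some "yes" then (if points ≥ 2 then points - 2 else 0) else points
  (PySem.Dict.getD pvGrades points "F", points)   -- key always present; getD default unreachable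

def cal_average_sleep_grade (sleep_duration : String) (sleep_aid_taken : Option String) : String × Int :=
  match pvToSecA sleep_duration with
  | some sec => pvRunA sec sleep_aid_taken
  | none => ("F", 0)   -- unreachable under Pre_: Python raises here

-- ===== PORT B =====
def pvBands : List (Int × Int × Int) :=
  [(21600, 23340, 1), (23400, 25199, 2), (25200, 26940, 3),
   (27000, 36000, 4), (36060, 37800, 3), (37860, 39600, 2),
   (41400, 43200, 1)]

-- B's parse: split on the colon into h and m, empty part read as zero, hours*3600 + mins*60
def pvParseB (s : String) : Option Int :=
  match (PySem.Str.split? s ":").getD [] with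
  | [h, m] =>
    match PySem.Int.ofStr? (if h = "" then "0" else h),
          PySem.Int.ofStr? (if m = "" then "0" else m) with
    | some hv, some mv => some (hv * 3600 + mv * 60)
    | _, _ => none
  | _ => none

-- the for/break loop: first matching band's points, else 0
def pvScan (sec : Int) : List (Int × Int × Int) → Int
  | [] => 0
  | (lo, hi, p) :: rest => if lo ≤ sec ∧ sec ≤ hi then p else pvScan sec rest

def pvRunB (sec : Int) (sleep_aid_taken : Option String) : String × Int :=
  let points := pvScan sec pvBands
  let points := if sleep_aid_taken = some "yes" then max (points - 2) 0 else points
  ((PySem.Str.pyGet? "FDCBA" points).map (fun c => String.ofList [c]) |>.getD "F", points)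
  -- grade-string indexing: points ∈ [0,4], so pyGet? is always some; getD default unreachable

def cal_average_sleep_grade_alt (sleep_duration : String) (sleep_aid_taken : Option String) : String × Int :=
  match pvParseB sleep_duration with
  | some sec => pvRunB sec sleep_aid_taken
  | none => ("F", 0)   -- unreachable under Pre_: Python raises here

-- ===== PRECONDITION & SPEC =====
-- Pre_ excludes exactly the inputs on which Python A raises (ValueError/unpack error in _to_sec):
-- sleep_duration must split on the colon into exactly two parts, each empty or int()-parseable.
def Pre_cal_average_sleep_grade (sleep_duration : String) (sleep_aid_taken : Option String) : Prop :=
  ((PySem.Str.split? sleep_duration ":").getD []).length = 2 ∧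
  ∀ x ∈ (PySem.Str.split? sleep_duration ":").getD [], x = "" ∨ (PySem.Int.ofStr? x).isSome
instance (sleep_duration : String) (sleep_aid_taken : Option String) : Decidable (Pre_cal_average_sleep_grade sleep_duration sleep_aid_taken) := by unfold Pre_cal_average_sleep_grade; infer_instance

def pvWitness_cal_average_sleep_grade : String × Option String := ("7:30", some "yes")

def Spec_cal_average_sleep_grade (sleep_duration : String) (sleep_aid_taken : Option String) (out : String × Int) : Prop := out = cal_average_sleep_grade_alt sleep_duration sleep_aid_taken
instance (sleep_duration : String) (sleep_aid_taken : Option String) (out : String × Int) : Decidable (Spec_cal_average_sleep_grade sleep_duration sleep_aid_taken out) := by unfold Spec_cal_average_sleep_grade; infer_instance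

-- ===== CLAIM (what is proved, stated in full; the proofs are below) =====
def Claim_equal_cal_average_sleep_grade : Prop := ∀ (sleep_duration : String) (sleep_aid_taken : Option String), Dom_cal_average_sleep_grade sleep_duration sleep_aid_taken → Pre_cal_average_sleep_grade sleep_duration sleep_aid_taken → Spec_cal_average_sleep_grade sleep_duration sleep_aid_taken (cal_average_sleep_grade sleep_duration sleep_aid_taken)

-- ===== LEMMAS AND PROOFS =====

-- under Pre_, both parsers succeed and agree
theorem piece_eq (x : String) (hx : x = "" ∨ (PySem.Int.ofStr? x).isSome) :
    (if x = "" then some (0 : Int) else PySem.Int.ofStr? x)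
      = PySem.Int.ofStr? (if x = "" then "0" else x)
    ∧ (if x = "" then some (0 : Int) else PySem.Int.ofStr? x).isSome := by
  by_cases e : x = "" <;> simp [e] at hx ⊢
  · decide
  · exact hx

theorem parse_eq (s : String) (hp : Pre_cal_average_sleep_grade s none) :
    pvToSecA s = pvParseB s ∧ (pvToSecA s).isSome := by
  obtain ⟨hlen, hall⟩ := hp
  unfold pvToSecA pvParseB
  match hsplit : (PySem.Str.split? s ":").getD [] with
  | [] => simp [hsplit] at hlen
  | [_] => simp [hsplit] at hlen
  | _ :: _ :: _ :: _ => simp [hsplit] at hlen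
  | [h, m] =>
    obtain ⟨eh, sh⟩ := piece_eq h (hall h (by rw [hsplit]; simp))
    obtain ⟨em, sm⟩ := piece_eq m (hall m (by rw [hsplit]; simp))
    obtain ⟨hv, hhv⟩ := Option.isSome_iff_exists.mp sh
    obtain ⟨mv, hmv⟩ := Option.isSome_iff_exists.mp sm
    have ehv : PySem.Int.ofStr? (if h = "" then "0" else h) = some hv := by rw [← eh]; exact hhv
    have emv : PySem.Int.ofStr? (if m = "" then "0" else m) = some mv := by rw [← em]; exact hmv
    simp [hhv, hmv, ehv, emv]

-- the cascade and the band scan agree on every second count, with or without the aid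
set_option maxHeartbeats 2000000 in
theorem run_eq (sec : Int) (aid : Option String) : pvRunA sec aid = pvRunB sec aid := by
  have e1 : PySem.Dict.getD pvTobj "6:00" 0 = 21600 := by decide
  have e2 : PySem.Dict.getD pvTobj "6:29" 0 = 23340 := by decide
  have e3 : PySem.Dict.getD pvTobj "6:30" 0 = 23400 := by decide
  have e4 : PySem.Dict.getD pvTobj "7:00" 0 = 25200 := by decide
  have e5 : PySem.Dict.getD pvTobj "7:29" 0 = 26940 := by decide
  have e6 : PySem.Dict.getD pvTobj "7:30" 0 = 27000 := by decide
  have e7 : PySem.Dict.getD pvTobj "10:00" 0 = 36000 := by decide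
  have e8 : PySem.Dict.getD pvTobj "10:01" 0 = 36060 := by decide
  have e9 : PySem.Dict.getD pvTobj "10:30" 0 = 37800 := by decide
  have e10 : PySem.Dict.getD pvTobj "10:31" 0 = 37860 := by decide
  have e11 : PySem.Dict.getD pvTobj "11:00" 0 = 39600 := by decide
  have e12 : PySem.Dict.getD pvTobj "11:30" 0 = 41400 := by decide
  have e13 : PySem.Dict.getD pvTobj "12:00" 0 = 43200 := by decide
  unfold pvRunA pvRunB
  simp only [pvBands, pvScan, e1, e2, e3, e4, e5, e6, e7, e8, e9, e10, e11, e12, e13]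
  split_ifs <;> first | rfl | omega

-- ===== VERDICT (by name: the statement is the Claim_ definition above) =====
theorem cal_average_sleep_grade_spec : Claim_equal_cal_average_sleep_grade := by
  intro s aid _ hp
  unfold Spec_cal_average_sleep_grade cal_average_sleep_grade cal_average_sleep_grade_alt
  obtain ⟨heq, hsome⟩ := parse_eq s ⟨hp.1, hp.2⟩
  rw [← heq]
  match hA : pvToSecA s with
  | none => simp [hA] at hsome
  | some sec => exact run_eq sec aid
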